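-- pv_equiv track=rewrite | github.com/aVeryTiredPotato/Jane-Clanker-Public | runtime/helpCommands.py | chunkHelpLines
-- ===== SOURCE A (Python) =====
-- def chunkHelpLines(lines: list[str], maxChars: int = 3500) -> list[str]:
--     chunks: list[str] = []
--     current = ""
--     for line in lines:
--         piece = line + "\n"
--         if len(current) + len(piece) > maxChars and current:
--             chunks.append(current.rstrip())
--             current = piece
--             continue
--         current += piece
--     if current.strip():
--         chunks.append(current.rstrip())
--     return chunks
-- ===== SOURCE B (Python) =====
-- def chunkHelpLines(lines: list[str], maxChars: int = 3500) -> list[str]: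
--     # Prefix sums of per-line costs (len+1), then per-chunk binary search for the
--     # farthest cut point; rendering (join/rstrip) and the blank-tail drop happen last.
--     pref = [0]
--     for l in lines:
--         pref.append(pref[-1] + len(l) + 1)
--     n = len(lines)
--     groups = []
--     i = 0
--     while i < n:
--         # largest j in [i+1, n] with pref[j] - pref[i] <= maxChars (j = i+1 if none fits)
--         lo, hi = i + 1, n
--         while lo < hi:
--             mid = (lo + hi + 1) // 2
--             if pref[mid] - pref[i] <= maxChars:
--                 lo = mid
--             else:
--                 hi = mid - 1
--         groups.append(lines[i:lo])
--         i = lo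
--     out = ["\n".join(g).rstrip() for g in groups]
--     if out and not "\n".join(groups[-1]).strip():
--         out.pop()
--     return out
-- ===== Notes on version B (the rewrite author's own statement) =====
-- stated objective: alternative
-- what changed: B precomputes prefix sums of per-line costs once and then finds each chunk boundary by binary search over the prefix-sum array, slicing the lines per chunk and rendering/blank-tail-dropping in a final pass, instead of A's single line-by-line loop growing a chunk string with a flush condition.
import Mathlib
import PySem

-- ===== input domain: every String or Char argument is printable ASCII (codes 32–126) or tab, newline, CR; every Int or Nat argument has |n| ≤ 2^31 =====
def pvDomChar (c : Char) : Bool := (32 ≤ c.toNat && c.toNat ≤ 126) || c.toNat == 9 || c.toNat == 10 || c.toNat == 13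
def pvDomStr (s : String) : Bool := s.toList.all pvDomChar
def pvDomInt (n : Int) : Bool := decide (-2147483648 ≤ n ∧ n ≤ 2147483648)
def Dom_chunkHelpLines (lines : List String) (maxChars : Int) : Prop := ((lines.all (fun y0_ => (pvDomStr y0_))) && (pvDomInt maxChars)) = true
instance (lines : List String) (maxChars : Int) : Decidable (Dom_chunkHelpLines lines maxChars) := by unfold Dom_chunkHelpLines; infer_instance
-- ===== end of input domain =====

-- B replaces A's line-by-line greedy string accumulation by prefix sums of per-line
-- costs plus a binary search for each chunk boundary; rendering and the blank-tail
-- drop happen in a final pass (objective: alternative).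

-- ===== PORT A =====
-- A's loop body: current is the growing chunk (as List Char, exact on code points).
def chunkA_step (maxChars : Int) (st : List (List Char) × List Char) (line : List Char) :
    List (List Char) × List Char :=
  let piece := line ++ ['\n']
  if ((st.2.length : Int) + (piece.length : Int) > maxChars) ∧ st.2 ≠ [] then
    (st.1 ++ [PySem.Chars.rstrip st.2], piece)
  else
    (st.1, st.2 ++ piece)

-- the final `if current.strip(): chunks.append(current.rstrip())` and return
def chunkA_finish (st : List (List Char) × List Char) : List String :=
  (if PySem.Chars.strip st.2 ≠ [] then st.1 ++ [PySem.Chars.rstrip st.2] else st.1).map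
    String.ofList

def chunkHelpLines (lines : List String) (maxChars : Int) : List String :=
  chunkA_finish ((lines.map String.toList).foldl (chunkA_step maxChars) ([], []))

-- ===== PORT B =====
-- `pref = [0]; for l in lines: pref.append(pref[-1] + len(l) + 1)`
def pvPref (lines : List String) : List Int :=
  lines.foldl (fun p l => p ++ [p.getLastD 0 + (PySem.Str.len l + 1)]) [0]

-- B's inner binary search: largest j in [lo, hi] with pref[j] - pref[i] <= maxChars
-- (stays at lo when none fits).  The extra Nat argument is only a totality guard
-- (an upper bound on the remaining iterations, hi - lo at every call); `pref[mid]`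
-- is in range whenever hi ≤ len(pref) - 1, which B's caller guarantees, so
-- `getD _ 0` is exact there.
def pvBsr (pref : List Int) (i : Nat) (mc : Int) : Nat → Nat → Nat → Nat
  | 0, lo, _hi => lo
  | fuel + 1, lo, hi =>
    if lo < hi then
      let mid := (lo + hi + 1) / 2
      if pref.getD mid 0 - pref.getD i 0 ≤ mc then pvBsr pref i mc fuel mid hi
      else pvBsr pref i mc fuel lo (mid - 1)
    else lo

-- B's outer while-loop over chunk start indices (the Nat argument again a
-- totality guard: n - i bounds the remaining iterations)
def pvChunkLoop (lines : List String) (pref : List Int) (mc : Int) (n : Nat) :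
    Nat → Nat → List (List String) → List (List String)
  | 0, _i, groups => groups
  | fuel + 1, i, groups =>
    if i < n then
      pvChunkLoop lines pref mc n fuel (pvBsr pref i mc (n - (i + 1)) (i + 1) n)
        (groups ++ [PySem.List.slice lines (some (i : Int))
          (some ((pvBsr pref i mc (n - (i + 1)) (i + 1) n : Nat) : Int))])
    else groups

def chunkHelpLines_alt (lines : List String) (maxChars : Int) : List String :=
  let pref := pvPref lines
  let groups := pvChunkLoop lines pref maxChars lines.length lines.length 0 []
  let out := groups.map (fun g => PySem.Str.rstrip (PySem.Str.join "\n" g))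
  if out ≠ [] ∧ PySem.Str.strip (PySem.Str.join "\n" (groups.getLastD [])) = "" then
    out.dropLast
  else out

-- ===== PRECONDITION & SPEC =====
def Spec_chunkHelpLines (lines : List String) (maxChars : Int) (out : List String) : Prop := out = chunkHelpLines_alt lines maxChars
instance (lines : List String) (maxChars : Int) (out : List String) : Decidable (Spec_chunkHelpLines lines maxChars out) := by unfold Spec_chunkHelpLines; infer_instance

-- ===== CLAIM (what is proved, stated in full; the proofs are below) =====
def Claim_equal_chunkHelpLines : Prop := ∀ (lines : List String) (maxChars : Int), Dom_chunkHelpLines lines maxChars → Spec_chunkHelpLines lines maxChars (chunkHelpLines lines maxChars)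

-- ===== LEMMAS AND PROOFS =====

-- per-line cost, as counted by both programs (len(line) + 1 for the '\n')
def pvW (l : String) : Nat := l.toList.length + 1

-- `pvCat g` = A's `current` string when the current chunk holds the raw lines `g`.
def pvCat (g : List String) : List Char := g.flatMap (fun l => l.toList ++ ['\n'])

-- "\n".join(g) on code points, and the rendering of a finished chunk
def pvJoinNL (g : List String) : List Char := PySem.Chars.join ['\n'] (g.map String.toList)
def pvOutG (g : List String) : List Char := PySem.Chars.rstrip (pvJoinNL g)

-- sum of costs of the first k lines (the value pref[k] holds)
def pvPk (lines : List String) (k : Nat) : Nat := ((lines.take k).map pvW).sum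

-- lines[i:m] for i ≤ m
def pvSliceL (lines : List String) (i m : Nat) : List String := (lines.drop i).take (m - i)

-- the greedy chunking both programs compute, written as recursion per line with the
-- open chunk g (g nonempty at every call)
def pvGreedy (mc : Int) (g : List String) : List String → List (List String)
  | [] => [g]
  | l :: rem =>
    if ((pvCat g).length : Int) + ((l.toList.length : Int) + 1) > mc then
      g :: pvGreedy mc [l] rem
    else
      pvGreedy mc (g ++ [l]) rem

def pvGroups (mc : Int) : List String → List (List String)
  | [] => []
  | l :: rest => pvGreedy mc [l] rest

-- shared final stage: render every chunk, drop the last one when it is blank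
def pvFinal (groups : List (List String)) : List String :=
  (if PySem.Chars.strip (pvCat (groups.getLastD [])) ≠ [] then groups.map pvOutG
   else groups.dropLast.map pvOutG).map String.ofList

lemma pvGreedy_ne_nil (mc : Int) (g : List String) (rem : List String) :
    pvGreedy mc g rem ≠ [] := by
  induction rem generalizing g with
  | nil => simp [pvGreedy]
  | cons l rem ih => simp only [pvGreedy]; split_ifs <;> simp [ih]

lemma pvCat_append (g : List String) (l : String) :
    pvCat (g ++ [l]) = pvCat g ++ (l.toList ++ ['\n']) := by
  simp [pvCat]

lemma pvCat_eq_nil_iff (g : List String) : pvCat g = [] ↔ g = [] := by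
  cases g with
  | nil => simp [pvCat]
  | cons x r => simp [pvCat]

lemma pvCat_eq (g : List String) (h : g ≠ []) : pvCat g = pvJoinNL g ++ ['\n'] := by
  induction g with
  | nil => simp at h
  | cons x r ih =>
    cases r with
    | nil => simp [pvCat, pvJoinNL, PySem.Chars.join, List.intercalate]
    | cons y t =>
      simp only [pvCat, List.flatMap_cons] at ih ⊢
      rw [ih (by simp)]
      simp [pvJoinNL, PySem.Chars.join, List.intercalate]

lemma pvRstrip_snoc_newline (s : List Char) :
    PySem.Chars.rstrip (s ++ ['\n']) = PySem.Chars.rstrip s := by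
  have h : PySem.Chars.isspace '\n' = true := by decide
  simp [PySem.Chars.rstrip, h]

lemma pvStrip_snoc_newline (s : List Char) :
    PySem.Chars.strip (s ++ ['\n']) = PySem.Chars.strip s := by
  simp only [PySem.Chars.strip, PySem.Chars.lstrip, List.dropWhile_append]
  by_cases h : (List.dropWhile PySem.Chars.isspace s).isEmpty
  · rw [if_pos h, List.isEmpty_iff.mp h]
    have h2 : List.dropWhile PySem.Chars.isspace ['\n'] = [] := by decide
    rw [h2]
  · rw [if_neg h, pvRstrip_snoc_newline]

lemma pvRstrip_cat (g : List String) : PySem.Chars.rstrip (pvCat g) = pvOutG g := by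
  by_cases h : g = []
  · subst h; rfl
  · rw [pvCat_eq _ h, pvOutG, pvRstrip_snoc_newline]

lemma pvStr_out (g : List String) :
    PySem.Str.rstrip (PySem.Str.join "\n" g) = String.ofList (pvOutG g) := by
  have h : (PySem.Str.rstrip (PySem.Str.join "\n" g)).toList = pvOutG g := by
    simp [pvOutG, pvJoinNL]
  rw [← h, String.ofList_toList]

lemma pvStrip_cat_eq (g : List String) :
    PySem.Chars.strip (pvCat g) = PySem.Chars.strip (pvJoinNL g) := by
  by_cases h : g = []
  · subst h; rfl
  · rw [pvCat_eq g h, pvStrip_snoc_newline]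

lemma pvGetLastD_cons {α : Type} {l : List α} (h : l ≠ []) (a d : α) :
    (a :: l).getLastD d = l.getLastD d := by
  cases l with
  | nil => simp at h
  | cons x r => simp

-- ---- A's loop equals the greedy chunking ----

lemma pvAloop (mc : Int) :
    ∀ (rem : List String) (gs : List (List Char)) (g : List String), g ≠ [] →
      (rem.map String.toList).foldl (chunkA_step mc) (gs, pvCat g) =
        (gs ++ (pvGreedy mc g rem).dropLast.map pvOutG,
         pvCat ((pvGreedy mc g rem).getLastD [])) := by
  intro rem
  induction rem with
  | nil => intro gs g hg; simp [pvGreedy]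
  | cons l rem ih =>
    intro gs g hg
    have hcat : pvCat g ≠ [] := by
      simpa [pvCat_eq_nil_iff] using hg
    simp only [List.map_cons, List.foldl_cons]
    by_cases hc : ((pvCat g).length : Int) + ((l.toList.length : Int) + 1) > mc
    · have hstep : chunkA_step mc (gs, pvCat g) l.toList
          = (gs ++ [PySem.Chars.rstrip (pvCat g)], l.toList ++ ['\n']) := by
        unfold chunkA_step
        rw [if_pos]
        refine ⟨?_, hcat⟩
        simp only [List.length_append, List.length_singleton]
        push_cast
        omega
      rw [hstep]
      have h2 : l.toList ++ ['\n'] = pvCat [l] := by simp [pvCat]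
      rw [h2, ih _ [l] (by simp), pvRstrip_cat]
      have hne := pvGreedy_ne_nil mc [l] rem
      simp only [pvGreedy, hc, if_pos, List.append_assoc]
      rw [List.dropLast_cons_of_ne_nil hne, pvGetLastD_cons hne]
      simp
    · have hstep : chunkA_step mc (gs, pvCat g) l.toList
          = (gs, pvCat g ++ (l.toList ++ ['\n'])) := by
        unfold chunkA_step
        rw [if_neg]
        intro hand
        apply hc
        have := hand.1
        simp only [List.length_append, List.length_singleton] at this
        push_cast at this
        omega
      rw [hstep, ← pvCat_append, ih _ (g ++ [l]) (by simp)]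
      have hgr : pvGreedy mc g (l :: rem) = pvGreedy mc (g ++ [l]) rem := by
        simp only [pvGreedy]
        rw [if_neg hc]
      rw [hgr]

lemma pvMapLast {α β : Type} (f : α → β) (G : List α) (h : G ≠ []) (d : α) :
    G.dropLast.map f ++ [f (G.getLastD d)] = G.map f := by
  conv_rhs => rw [← List.dropLast_concat_getLast h]
  rw [List.map_append, List.map_singleton]
  congr 2
  rw [List.getLastD_eq_getLast?, List.getLast?_eq_some_getLast h]
  rfl

lemma pvA_eq (lines : List String) (mc : Int) :
    chunkHelpLines lines mc = pvFinal (pvGroups mc lines) := by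
  cases lines with
  | nil =>
    have h : PySem.Chars.strip ([] : List Char) = [] := by decide
    simp [chunkHelpLines, chunkA_finish, pvFinal, pvGroups, pvCat, h]
  | cons l rest =>
    unfold chunkHelpLines
    simp only [List.map_cons, List.foldl_cons]
    have hstep : chunkA_step mc ([], []) l.toList = ([], pvCat [l]) := by
      unfold chunkA_step
      rw [if_neg (by simp)]
      simp [pvCat]
    rw [hstep, pvAloop mc rest [] [l] (by simp)]
    unfold chunkA_finish pvFinal pvGroups
    simp only [List.nil_append]
    set G := pvGreedy mc [l] rest with hG
    have hne : G ≠ [] := pvGreedy_ne_nil mc [l] rest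
    rw [pvRstrip_cat]
    by_cases hs : PySem.Chars.strip (pvCat (G.getLastD [])) ≠ []
    · rw [if_pos hs, if_pos hs, pvMapLast _ _ hne]
    · rw [if_neg hs, if_neg hs]

-- ---- prefix-sum facts ----

lemma pvPref_eq (lines : List String) :
    pvPref lines = (List.range (lines.length + 1)).map (fun k => (pvPk lines k : Int)) := by
  induction lines using List.reverseRecOn with
  | nil => simp [pvPref, pvPk]
  | append_singleton ls x ih =>
    unfold pvPref at ih ⊢
    rw [List.foldl_append]
    simp only [List.foldl_cons, List.foldl_nil]
    rw [ih]
    have hlast : ((List.range (ls.length + 1)).map (fun k => (pvPk ls k : Int))).getLastD 0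
        = (pvPk ls ls.length : Int) := by
      rw [List.range_succ, List.map_append]
      simp
    rw [hlast]
    have hr : List.range (ls.length + 1 + 1) = List.range (ls.length + 1) ++ [ls.length + 1] := by
      rw [List.range_succ]
    simp only [List.length_append, List.length_singleton]
    rw [hr, List.map_append]
    congr 1
    · apply List.map_congr_left
      intro k hk
      have hk' : k ≤ ls.length := by simpa [List.mem_range] using Nat.lt_succ_iff.mp (by simpa using hk)
      congr 1
      unfold pvPk
      rw [List.take_append_of_le_length hk']
    · simp only [List.map_singleton]
      congr 1
      have h1 : pvPk (ls ++ [x]) (ls.length + 1) = pvPk ls ls.length + pvW x := by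
        unfold pvPk
        rw [List.take_of_length_le (by simp)]
        rw [List.take_of_length_le (by simp)]
        simp
      rw [h1]
      have hlen : PySem.Str.len x = (x.toList.length : Int) := by simp [pysem]
      rw [hlen]
      push_cast [pvW]
      ring

lemma pvPref_getD (lines : List String) (k : Nat) (hk : k ≤ lines.length) :
    (pvPref lines).getD k 0 = (pvPk lines k : Int) := by
  rw [pvPref_eq]
  simp [List.getD, Nat.lt_succ_iff.mpr hk]

lemma pvPk_succ (lines : List String) (k : Nat) (hk : k < lines.length) :
    pvPk lines (k + 1) = pvPk lines k + pvW lines[k]! := by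
  unfold pvPk
  rw [getElem!_pos lines k hk]
  simp only [List.map_take]
  rw [List.sum_take_succ _ _ (by simpa using hk)]
  simp

lemma pvPk_mono (lines : List String) {a b : Nat} (hab : a ≤ b) :
    pvPk lines a ≤ pvPk lines b := by
  have h1 : lines.take a = (lines.take b).take a := by rw [List.take_take, min_eq_left hab]
  unfold pvPk
  rw [h1]
  exact List.Sublist.sum_le_sum (List.Sublist.map _ (List.take_sublist _ _)) (by simp)

lemma pvCat_length (g : List String) : (pvCat g).length = (g.map pvW).sum := by
  induction g with
  | nil => simp [pvCat]
  | cons l r ih => simp [pvCat, pvW] at ih ⊢; omega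

lemma pvPk_slice (lines : List String) (i m : Nat) (him : i ≤ m) :
    pvPk lines i + ((pvSliceL lines i m).map pvW).sum = pvPk lines m := by
  have h : lines.take m = lines.take i ++ (lines.drop i).take (m - i) := by
    rw [← List.take_add]
    congr 1
    omega
  simp [pvPk, pvSliceL, h]

-- ---- binary-search characterisation ----

lemma pvBsr_spec (pref : List Int) (i : Nat) (mc : Int) :
    ∀ (fuel lo hi : Nat), hi - lo ≤ fuel → lo ≤ hi →
      (∀ a b : Nat, a ≤ b → b ≤ hi →
        pref.getD b 0 - pref.getD i 0 ≤ mc → pref.getD a 0 - pref.getD i 0 ≤ mc) →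
      lo ≤ pvBsr pref i mc fuel lo hi ∧ pvBsr pref i mc fuel lo hi ≤ hi ∧
      (pvBsr pref i mc fuel lo hi = lo ∨
        pref.getD (pvBsr pref i mc fuel lo hi) 0 - pref.getD i 0 ≤ mc) ∧
      (∀ t : Nat, pvBsr pref i mc fuel lo hi < t → t ≤ hi →
        ¬ (pref.getD t 0 - pref.getD i 0 ≤ mc)) := by
  intro fuel
  induction fuel with
  | zero =>
    intro lo hi hf hle hmono
    simp only [pvBsr]
    exact ⟨le_refl _, hle, by simp, fun t h1 h2 => absurd (by omega : t ≤ lo) (by omega)⟩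
  | succ fuel ih =>
    intro lo hi hf hle hmono
    simp only [pvBsr]
    by_cases h : lo < hi
    · rw [if_pos h]
      have hmid1 : lo + 1 ≤ (lo + hi + 1) / 2 := by omega
      have hmid2 : (lo + hi + 1) / 2 ≤ hi := by omega
      by_cases hP : pref.getD ((lo + hi + 1) / 2) 0 - pref.getD i 0 ≤ mc
      · rw [if_pos hP]
        obtain ⟨c1, c2, c3, c4⟩ := ih ((lo + hi + 1) / 2) hi (by omega) hmid2 hmono
        refine ⟨by omega, c2, ?_, c4⟩
        rcases c3 with h3 | h3
        · exact Or.inr (by rw [h3]; exact hP)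
        · exact Or.inr h3
      · rw [if_neg hP]
        obtain ⟨c1, c2, c3, c4⟩ := ih lo ((lo + hi + 1) / 2 - 1) (by omega) (by omega)
          (fun a b hab hb => hmono a b hab (by omega))
        refine ⟨c1, by omega, c3, ?_⟩
        intro t h1 h2
        by_cases ht : t ≤ (lo + hi + 1) / 2 - 1
        · exact c4 t h1 ht
        · intro hPt
          exact hP (hmono _ t (by omega) h2 hPt)
    · rw [if_neg h]
      exact ⟨le_refl _, hle, Or.inl rfl, fun t h1 h2 => absurd h2 (by omega)⟩


-- ---- the consumed chunk matches the binary-search cut ----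

lemma pvSliceL_snoc (lines : List String) (i m : Nat) (h1 : i ≤ m) (h2 : m < lines.length) :
    pvSliceL lines i m ++ [lines[m]!] = pvSliceL lines i (m + 1) := by
  unfold pvSliceL
  have he : m + 1 - i = (m - i) + 1 := by omega
  rw [he, List.take_add_one]
  have hg : (lines.drop i)[m - i]? = some lines[m] := by
    rw [List.getElem?_drop]
    rw [List.getElem?_eq_getElem (by omega)]
    congr 1
    congr 1
    omega
  rw [hg, getElem!_pos lines m h2]
  rfl

lemma pvMono (lines : List String) (mc : Int) (i : Nat) :
    ∀ a b : Nat, a ≤ b → b ≤ lines.length →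
      (pvPref lines).getD b 0 - (pvPref lines).getD i 0 ≤ mc →
      (pvPref lines).getD a 0 - (pvPref lines).getD i 0 ≤ mc := by
  intro a b hab hb hP
  rw [pvPref_getD lines a (by omega)] at *
  rw [pvPref_getD lines b hb] at hP
  have := pvPk_mono lines hab
  omega

-- condition of pvGreedy at position m, in prefix-sum form
lemma pvCond (lines : List String) (mc : Int) (i m : Nat) (him : i < m) (hm : m < lines.length) :
    (((pvCat (pvSliceL lines i m)).length : Int) + ((lines[m]!.toList.length : Int) + 1) > mc)
      ↔ ¬ ((pvPref lines).getD (m + 1) 0 - (pvPref lines).getD i 0 ≤ mc) := by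
  rw [pvPref_getD lines (m + 1) (by omega), pvPref_getD lines i (by omega)]
  rw [pvCat_length]
  have h1 := pvPk_slice lines i m (by omega)
  have h2 := pvPk_succ lines m hm
  rw [getElem!_pos lines m hm] at *
  unfold pvW at h2
  omega

lemma pvConsume_base (lines : List String) (mc : Int) (i J : Nat) (hJ2 : J ≤ lines.length)
    (hiJ : i < J)
    (hJ4 : J < lines.length →
      ¬ ((pvPref lines).getD (J + 1) 0 - (pvPref lines).getD i 0 ≤ mc)) :
    pvGreedy mc (pvSliceL lines i J) (lines.drop J) =
      pvSliceL lines i J ::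
        (if _h : J < lines.length then
          pvGreedy mc [lines[J]!] (lines.drop (J + 1)) else []) := by
  by_cases hJn : J < lines.length
  · rw [List.drop_eq_getElem_cons hJn]
    rw [dif_pos hJn]
    have hcond := (pvCond lines mc i J hiJ hJn).mpr (hJ4 hJn)
    rw [getElem!_pos lines J hJn] at hcond
    simp only [pvGreedy]
    rw [if_pos hcond, getElem!_pos lines J hJn]
  · have hdrop : lines.drop J = [] := List.drop_of_length_le (by omega)
    rw [hdrop, dif_neg hJn]
    rfl

lemma pvConsumeAux (lines : List String) (mc : Int) (i J : Nat)
    (hJ2 : J ≤ lines.length) (hJ1 : i + 1 ≤ J)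
    (hJ3 : J = i + 1 ∨ (pvPref lines).getD J 0 - (pvPref lines).getD i 0 ≤ mc)
    (hJ4 : ∀ t : Nat, J < t → t ≤ lines.length →
      ¬ ((pvPref lines).getD t 0 - (pvPref lines).getD i 0 ≤ mc)) :
    ∀ (fuel m : Nat), J - m ≤ fuel → i < m → m ≤ J →
      pvGreedy mc (pvSliceL lines i m) (lines.drop m) =
        pvSliceL lines i J ::
          (if _h : J < lines.length then
            pvGreedy mc [lines[J]!] (lines.drop (J + 1)) else []) := by
  intro fuel
  induction fuel with
  | zero =>
    intro m hfm him hmJ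
    have hm : m = J := by omega
    subst hm
    exact pvConsume_base lines mc i m hJ2 him (fun h => hJ4 (m + 1) (by omega) (by omega))
  | succ fuel ih =>
    intro m hfm him hmJ
    by_cases hm : m = J
    · subst hm
      exact pvConsume_base lines mc i m hJ2 him (fun h => hJ4 (m + 1) (by omega) (by omega))
    · have hmJ' : m < J := by omega
      have hPJ : (pvPref lines).getD J 0 - (pvPref lines).getD i 0 ≤ mc := by
        rcases hJ3 with h | h
        · omega
        · exact h
      have hPm1 : (pvPref lines).getD (m + 1) 0 - (pvPref lines).getD i 0 ≤ mc :=
        pvMono lines mc i (m + 1) J (by omega) (by omega) hPJ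
      have hmn : m < lines.length := by omega
      rw [List.drop_eq_getElem_cons hmn]
      have hcond := (pvCond lines mc i m him hmn)
      rw [getElem!_pos lines m hmn] at hcond
      simp only [pvGreedy]
      rw [if_neg (by rw [hcond]; simpa using hPm1)]
      rw [show (pvSliceL lines i m ++ [lines[m]]) = pvSliceL lines i (m + 1) by
        rw [← pvSliceL_snoc lines i m (by omega) hmn, getElem!_pos lines m hmn]]
      exact ih (m + 1) (by omega) (by omega) (by omega)

lemma pvLoop_eq (lines : List String) (mc : Int) :
    ∀ (fuel i : Nat) (gs : List (List String)), lines.length - i ≤ fuel →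
      pvChunkLoop lines (pvPref lines) mc lines.length fuel i gs =
        gs ++ (if _h : i < lines.length then
                 pvGreedy mc [lines[i]!] (lines.drop (i + 1))
               else []) := by
  intro fuel i gs
  induction fuel generalizing i gs with
  | zero =>
    intro hf
    have hni : ¬ i < lines.length := by omega
    simp only [pvChunkLoop]
    rw [dif_neg hni]
    simp
  | succ fuel ih =>
    intro hf
    simp only [pvChunkLoop]
    by_cases hni : i < lines.length
    · rw [if_pos hni, dif_pos hni]
      obtain ⟨hJ1, hJ2, hJ3, hJ4⟩ := pvBsr_spec (pvPref lines) i mc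
        (lines.length - (i + 1)) (i + 1) lines.length (by omega) (by omega)
        (pvMono lines mc i)
      set J := pvBsr (pvPref lines) i mc (lines.length - (i + 1)) (i + 1) lines.length
        with hJ
      have hslice : PySem.List.slice lines (some (i : Int)) (some (J : Int))
          = pvSliceL lines i J := by
        rw [PySem.List.slice_natCast]
        rfl
      have hsl1 : pvSliceL lines i (i + 1) = [lines[i]!] := by
        have := pvSliceL_snoc lines i i (le_refl i) hni
        unfold pvSliceL at this ⊢
        simpa using this.symm
      have hcons := pvConsumeAux lines mc i J hJ2 hJ1 hJ3 hJ4 (J - (i + 1)) (i + 1)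
        (by omega) (by omega) (by omega)
      rw [hsl1] at hcons
      rw [ih J (gs ++ [PySem.List.slice lines (some (i : Int)) (some (J : Int))]) (by omega)]
      rw [hslice, List.append_assoc]
      congr 1
      by_cases hJn : J < lines.length
      · rw [dif_pos hJn] at hcons ⊢
        rw [hcons]
        rfl
      · rw [dif_neg hJn] at hcons ⊢
        rw [hcons]
        rfl
    · rw [if_neg hni, dif_neg hni]
      simp

lemma pvB_final (G : List (List String)) (hne : G ≠ []) :
    (if (G.map (fun g => PySem.Str.rstrip (PySem.Str.join "\n" g))) ≠ [] ∧
        PySem.Str.strip (PySem.Str.join "\n" (G.getLastD [])) = "" then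
      (G.map (fun g => PySem.Str.rstrip (PySem.Str.join "\n" g))).dropLast
     else G.map (fun g => PySem.Str.rstrip (PySem.Str.join "\n" g))) = pvFinal G := by
  have hout : G.map (fun g => PySem.Str.rstrip (PySem.Str.join "\n" g))
      = (G.map pvOutG).map String.ofList := by
    rw [List.map_map]
    apply List.map_congr_left
    intro g _
    exact pvStr_out g
  have htoList : (PySem.Str.strip (PySem.Str.join "\n" (G.getLastD []))).toList
      = PySem.Chars.strip (pvCat (G.getLastD [])) := by
    rw [pvStrip_cat_eq]
    simp [pvJoinNL]
  have htail : (PySem.Str.strip (PySem.Str.join "\n" (G.getLastD [])) = "")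
      ↔ (PySem.Chars.strip (pvCat (G.getLastD [])) = []) := by
    rw [← htoList, ← String.toList_eq_nil_iff]
  have hne' : G.map (fun g => PySem.Str.rstrip (PySem.Str.join "\n" g)) ≠ [] := by
    simpa using hne
  unfold pvFinal
  by_cases hs : PySem.Chars.strip (pvCat (G.getLastD [])) = []
  · rw [if_pos ⟨hne', htail.mpr hs⟩, if_neg (by simpa using hs)]
    rw [hout, List.map_map, List.map_map, ← List.map_dropLast]
  · rw [if_neg (by intro h; exact hs (htail.mp h.2)), if_pos (by simpa using hs), hout]

lemma pvB_eq (lines : List String) (mc : Int) :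
    chunkHelpLines_alt lines mc = pvFinal (pvGroups mc lines) := by
  unfold chunkHelpLines_alt
  dsimp only
  rw [pvLoop_eq lines mc lines.length 0 [] (by omega)]
  cases lines with
  | nil =>
    simp only [List.length_nil, Nat.lt_irrefl, dif_neg, not_false_iff]
    have h : PySem.Chars.strip ([] : List Char) = [] := by decide
    simp [pvFinal, pvGroups, pvCat, h]
  | cons l rest =>
    have h0 : (0 : Nat) < (l :: rest).length := by simp
    rw [dif_pos h0]
    have hg : (l :: rest)[0]! = l := by simp [getElem!_pos]
    have hd : (l :: rest).drop 1 = rest := by simp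
    rw [hg, hd]
    simp only [List.nil_append]
    exact pvB_final (pvGreedy mc [l] rest) (pvGreedy_ne_nil mc [l] rest)

-- ===== VERDICT (by name: the statement is the Claim_ definition above) =====
theorem chunkHelpLines_spec : Claim_equal_chunkHelpLines := by
  intro lines maxChars _
  unfold Spec_chunkHelpLines
  rw [pvA_eq, pvB_eq]
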